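-- pv_equiv track=rewrite | github.com/Baranwal-47/Ayurvedic-Multi-Modal-RAG-Agent | backend/ingestion/docling_parser.py | plan_page_windows
-- ===== SOURCE A (Python) =====
-- from collections.abc import Iterable
--
-- def plan_page_windows(page_numbers: Iterable[int], batch_size: int) -> list[tuple[int, int]]:
--     """Group requested page numbers into contiguous windows with a maximum size."""
--     numbers = sorted({int(page) for page in page_numbers if int(page) > 0})
--     if not numbers:
--         return []
--
--     batch_size = max(1, int(batch_size))
--     windows: list[tuple[int, int]] = []
--
--     run_start = numbers[0]
--     run_end = numbers[0]
--     for page_number in numbers[1:]: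
--         if page_number == run_end + 1:
--             run_end = page_number
--             continue
--
--         windows.extend(_split_window(run_start, run_end, batch_size))
--         run_start = run_end = page_number
--
--     windows.extend(_split_window(run_start, run_end, batch_size))
--     return windows
--
-- def _split_window(start_page: int, end_page: int, batch_size: int) -> list[tuple[int, int]]:
--     windows: list[tuple[int, int]] = []
--     page = int(start_page)
--     while page <= int(end_page):
--         window_end = min(int(end_page), page + batch_size - 1)
--         windows.append((page, window_end))
--         page = window_end + 1
--     return windows
-- ===== SOURCE B (Python) =====
-- def plan_page_windows(page_numbers, batch_size):
--     """Group requested page numbers into contiguous windows with a maximum size.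
--
--     Single pass over the sorted distinct pages: the gap-break and the
--     size-limit-break are one condition, so no run/split helper is needed.
--     """
--     numbers = sorted({int(page) for page in page_numbers if int(page) > 0})
--     if not numbers:
--         return []
--
--     batch_size = max(1, int(batch_size))
--     windows = []
--     window_start = window_end = numbers[0]
--     for page in numbers[1:]:
--         if page == window_end + 1 and window_end - window_start + 1 < batch_size:
--             window_end = page
--         else:
--             windows.append((window_start, window_end))
--             window_start = window_end = page
--     windows.append((window_start, window_end))
--     return windows
-- ===== Notes on version B (the rewrite author's own statement) =====
-- stated objective: simpler
-- what changed: Replaced the run-detection loop plus the _split_window while-loop helper by one single-pass loop whose single condition merges the gap break and the size-limit break, emitting each window directly.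
import Mathlib
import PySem

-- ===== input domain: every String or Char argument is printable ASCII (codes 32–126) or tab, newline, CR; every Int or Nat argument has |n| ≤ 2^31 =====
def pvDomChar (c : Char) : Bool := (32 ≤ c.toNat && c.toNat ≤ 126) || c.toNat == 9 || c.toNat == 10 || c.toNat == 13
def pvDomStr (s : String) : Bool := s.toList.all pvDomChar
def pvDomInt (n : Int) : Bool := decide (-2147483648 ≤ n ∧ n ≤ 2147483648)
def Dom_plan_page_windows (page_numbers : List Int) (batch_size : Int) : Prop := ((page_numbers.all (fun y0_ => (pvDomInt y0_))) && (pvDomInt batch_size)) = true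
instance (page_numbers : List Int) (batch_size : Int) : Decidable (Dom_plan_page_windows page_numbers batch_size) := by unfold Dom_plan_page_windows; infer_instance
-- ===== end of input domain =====

-- B replaces A's run-detection loop + _split_window helper by one single-pass loop
-- whose single condition merges the gap break and the size-limit break (objective: simpler).

-- ===== PORT A =====
-- _split_window's while loop; the `max (we + 1) (page + 1)` is a termination-only
-- device: Python loops forever when batch_size ≤ 0, but every call site passes
-- batch_size ≥ 1, where max (we + 1) (page + 1) = we + 1 exactly as in Python.
def splitWindow (page end_page b : Int) : List (Int × Int) :=
  if page ≤ end_page then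
    -- window_end inlined into both uses
    (page, min end_page (page + b - 1)) ::
      splitWindow (max (min end_page (page + b - 1) + 1) (page + 1)) end_page b
  else []
termination_by (end_page + 1 - page).toNat
decreasing_by omega

-- the for-loop of A, state (run_start, run_end, windows)
def loopA (b rs re : Int) (windows : List (Int × Int)) : List Int → List (Int × Int)
  | [] => windows ++ splitWindow rs re b
  | p :: rest =>
      if p = re + 1 then loopA b rs p windows rest
      else loopA b p p (windows ++ splitWindow rs re b) rest

def plan_page_windows (page_numbers : List Int) (batch_size : Int) : List (Int × Int) :=
  let numbers := PySem.List.sorted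
    (PySem.Set.ofList (page_numbers.filter (fun page => decide (0 < page)))) (fun x => x) false
  match numbers with
  | [] => []
  | n :: rest => loopA (max 1 batch_size) n n [] rest

-- ===== PORT B =====
-- the single for-loop of B, state (window_start, window_end, windows)
def loopB (b ws we : Int) (windows : List (Int × Int)) : List Int → List (Int × Int)
  | [] => windows ++ [(ws, we)]
  | p :: rest =>
      if p = we + 1 ∧ we - ws + 1 < b then loopB b ws p windows rest
      else loopB b p p (windows ++ [(ws, we)]) rest

def plan_page_windows_alt (page_numbers : List Int) (batch_size : Int) : List (Int × Int) :=
  let numbers := PySem.List.sorted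
    (PySem.Set.ofList (page_numbers.filter (fun page => decide (0 < page)))) (fun x => x) false
  match numbers with
  | [] => []
  | n :: rest => loopB (max 1 batch_size) n n [] rest

-- ===== PRECONDITION & SPEC =====
def Spec_plan_page_windows (page_numbers : List Int) (batch_size : Int) (out : List (Int × Int)) : Prop := out = plan_page_windows_alt page_numbers batch_size
instance (page_numbers : List Int) (batch_size : Int) (out : List (Int × Int)) : Decidable (Spec_plan_page_windows page_numbers batch_size out) := by unfold Spec_plan_page_windows; infer_instance

-- ===== CLAIM (what is proved, stated in full; the proofs are below) =====
def Claim_equal_plan_page_windows : Prop := ∀ (page_numbers : List Int) (batch_size : Int), Dom_plan_page_windows page_numbers batch_size → Spec_plan_page_windows page_numbers batch_size (plan_page_windows page_numbers batch_size)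

-- ===== LEMMAS AND PROOFS =====

theorem splitWindow_nil (s e b : Int) (h : e < s) : splitWindow s e b = [] := by
  rw [splitWindow]; simp [not_le.mpr h]

theorem splitWindow_one (s e b : Int) (h1 : s ≤ e) (h2 : e ≤ s + b - 1) :
    splitWindow s e b = [(s, e)] := by
  rw [splitWindow, if_pos h1, show min e (s + b - 1) = e by omega,
    splitWindow_nil (max (e + 1) (s + 1)) e b (by omega)]

-- the last chunk of splitWindow s e b is (w, e) when w is a chunk start within b of e
theorem split_last (b s w e : Int) (hb : 1 ≤ b) (hsw : s ≤ w) (hwe : w ≤ e)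
    (hd : b ∣ w - s) (hlt : e - w < b) :
    splitWindow s e b = splitWindow s (w - 1) b ++ [(w, e)] := by
  by_cases hw : w = s
  · subst hw
    rw [splitWindow_one _ _ _ hwe (by omega), splitWindow_nil _ _ _ (by omega)]
    simp
  · obtain ⟨k, hk⟩ := hd
    have hk1 : 1 ≤ k := by
      by_contra h
      have hk0 : b * k ≤ 0 := mul_nonpos_of_nonneg_of_nonpos (by omega) (by omega)
      omega
    have hbk : b * 1 ≤ b * k := mul_le_mul_of_nonneg_left hk1 (by omega)
    have hbw : s + b ≤ w := by linarith [hk]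
    have h1 : splitWindow s e b = (s, s + b - 1) :: splitWindow (s + b) e b := by
      rw [splitWindow, if_pos (show s ≤ e by omega),
        show min e (s + b - 1) = s + b - 1 by omega,
        show max (s + b - 1 + 1) (s + 1) = s + b by omega]
    have h2 : splitWindow s (w - 1) b = (s, s + b - 1) :: splitWindow (s + b) (w - 1) b := by
      rw [splitWindow, if_pos (show s ≤ w - 1 by omega),
        show min (w - 1) (s + b - 1) = s + b - 1 by omega,
        show max (s + b - 1 + 1) (s + 1) = s + b by omega]
    rw [h1, h2,
      split_last b (s + b) w e hb hbw hwe ⟨k - 1, by rw [mul_sub, mul_one]; omega⟩ hlt]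
    simp
termination_by (w - s).toNat
decreasing_by omega

-- loop invariant: A's run state (s, e) corresponds to B's current chunk (w, e),
-- with all complete chunks of the current run already in B's accumulator
theorem master (b : Int) (hb : 1 ≤ b) (rest : List Int) :
    ∀ (s w e : Int) (acc : List (Int × Int)), s ≤ w → w ≤ e → b ∣ w - s → e - w < b →
    loopA b s e acc rest = loopB b w e (acc ++ splitWindow s (w - 1) b) rest := by
  induction rest with
  | nil =>
      intro s w e acc hsw hwe hd hlt
      simp only [loopA, loopB]
      rw [split_last b s w e hb hsw hwe hd hlt, List.append_assoc]
  | cons p rest ih =>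
      intro s w e acc hsw hwe hd hlt
      simp only [loopA, loopB]
      by_cases hp : p = e + 1
      · by_cases hsz : e - w + 1 < b
        · rw [if_pos hp, if_pos ⟨hp, hsz⟩, hp]
          exact ih s w (e + 1) acc hsw (by omega) hd (by omega)
        · rw [if_pos hp, if_neg (by tauto), hp]
          obtain ⟨k, hk⟩ := hd
          have heb : e - w + 1 = b := by omega
          have := ih s (e + 1) (e + 1) acc (by omega) le_rfl
            ⟨k + 1, by rw [mul_add, mul_one]; omega⟩ (by omega)
          rw [this, show e + 1 - 1 = e by ring,
            split_last b s w e hb hsw hwe ⟨k, hk⟩ hlt, List.append_assoc]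
      · rw [if_neg hp, if_neg (by tauto)]
        have hsp : splitWindow p (p - 1) b = [] := splitWindow_nil p (p - 1) b (by omega)
        have := ih p p p (acc ++ splitWindow s e b) le_rfl le_rfl ⟨0, by ring⟩ (by omega)
        rw [this, hsp, List.append_nil,
          split_last b s w e hb hsw hwe hd hlt, List.append_assoc]

-- ===== VERDICT (by name: the statement is the Claim_ definition above) =====
theorem plan_page_windows_spec : Claim_equal_plan_page_windows := by
  intro page_numbers batch_size _
  unfold Spec_plan_page_windows plan_page_windows plan_page_windows_alt
  cases PySem.List.sorted
      (PySem.Set.ofList (page_numbers.filter (fun page => decide (0 < page)))) (fun x => x) false with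
  | nil => rfl
  | cons n rest =>
      have hb : (1 : Int) ≤ max 1 batch_size := le_max_left _ _
      have := master (max 1 batch_size) hb rest n n n [] le_rfl le_rfl ⟨0, by ring⟩ (by omega)
      simpa [splitWindow_nil n (n - 1) _ (by omega)] using this
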